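-- pv_equiv track=rewrite | github.com/ONSdigital/ras-api-gateway | swagger_server/controllers_local/aggregation.py | calculate_case_status
-- ===== SOURCE A (Python) =====
-- def calculate_case_status(case_events):
--     """
--     Business logic to determine the status of an event
--
--     :param case_events: A list of case events
--     :return: A status string in ['Not Started', 'Completed', 'In Progress']
--     """
--     status = ''
--     for event in case_events:
--         if event['category'] == 'CASE_UPLOADED':
--             status = 'Complete'
--             break
--     if status == '':
--         for event in case_events:
--             if event['category'] == 'CASE_DOWNLOADED':
--                 status = 'In progress'
--                 break
--     if status == '':
--         status = 'Not started'
--     return status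
-- ===== SOURCE B (Python) =====
-- def calculate_case_status(case_events):
--     downloaded = False
--     for event in case_events:
--         category = event['category']
--         if category == 'CASE_UPLOADED':
--             return 'Complete'
--         if category == 'CASE_DOWNLOADED':
--             downloaded = True
--     return 'In progress' if downloaded else 'Not started'
-- ===== Notes on version B (the rewrite author's own statement) =====
-- stated objective: simpler
-- what changed: Single early-exit pass maintaining a downloaded flag replaces A's two sequential scans and string-sentinel status variable.
import Mathlib
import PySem

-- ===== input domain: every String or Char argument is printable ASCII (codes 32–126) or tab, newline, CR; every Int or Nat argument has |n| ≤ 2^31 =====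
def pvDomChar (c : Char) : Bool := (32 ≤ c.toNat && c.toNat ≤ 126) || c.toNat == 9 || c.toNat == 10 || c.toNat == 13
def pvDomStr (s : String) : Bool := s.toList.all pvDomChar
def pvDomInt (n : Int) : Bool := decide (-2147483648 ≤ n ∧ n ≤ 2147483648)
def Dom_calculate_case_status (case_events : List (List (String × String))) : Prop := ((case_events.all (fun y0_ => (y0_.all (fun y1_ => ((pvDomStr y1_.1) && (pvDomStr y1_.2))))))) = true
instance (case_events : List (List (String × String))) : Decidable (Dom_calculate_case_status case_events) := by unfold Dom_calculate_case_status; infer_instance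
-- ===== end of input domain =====

-- B: one early-exit pass with a downloaded flag instead of A's two sequential scans; equality proved for return values on inputs where every event before the first CASE_UPLOADED has a 'category' key (elsewhere Python A raises KeyError).
-- ===== PORT A =====
-- first loop of A: scan for 'CASE_UPLOADED', status stays '' if not found
def pvALoop1 : List (List (String × String)) → String
  | [] => ""
  | e :: t =>
    if PySem.Dict.getD (PySem.Dict.mk e) "category" "" == "CASE_UPLOADED" then "Complete" else pvALoop1 t

-- second loop of A: scan for 'CASE_DOWNLOADED'
def pvALoop2 : List (List (String × String)) → String
  | [] => ""
  | e :: t =>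
    if PySem.Dict.getD (PySem.Dict.mk e) "category" "" == "CASE_DOWNLOADED" then "In progress" else pvALoop2 t

def calculate_case_status (case_events : List (List (String × String))) : String :=
  let status := pvALoop1 case_events
  let status := if status == "" then pvALoop2 case_events else status
  if status == "" then "Not started" else status

-- ===== PORT B =====
def pvBLoop : List (List (String × String)) → Bool → String
  | [], downloaded => if downloaded then "In progress" else "Not started"
  | e :: t, downloaded =>
    let category := PySem.Dict.getD (PySem.Dict.mk e) "category" ""
    if category == "CASE_UPLOADED" then "Complete"
    else pvBLoop t (downloaded || (category == "CASE_DOWNLOADED"))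

def calculate_case_status_alt (case_events : List (List (String × String))) : String :=
  pvBLoop case_events false

-- ===== PRECONDITION & SPEC =====
-- Pre_ excludes exactly the inputs where Python A raises KeyError: some event lacking a
-- 'category' key occurs before the first CASE_UPLOADED event (Python B raises there too).
def Pre_calculate_case_status (case_events : List (List (String × String))) : Prop :=
  ∀ e ∈ case_events.takeWhile
      (fun e => ¬ (PySem.Dict.get? (PySem.Dict.mk e) "category" == some "CASE_UPLOADED")),
    (PySem.Dict.get? (PySem.Dict.mk e) "category").isSome

instance (case_events : List (List (String × String))) : Decidable (Pre_calculate_case_status case_events) := by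
  unfold Pre_calculate_case_status; infer_instance

def pvWitness_calculate_case_status : (List (List (String × String))) :=
  [[("category", "CASE_DOWNLOADED")], [("category", "OTHER")]]

def Spec_calculate_case_status (case_events : List (List (String × String))) (out : String) : Prop := out = calculate_case_status_alt case_events
instance (case_events : List (List (String × String))) (out : String) : Decidable (Spec_calculate_case_status case_events out) := by unfold Spec_calculate_case_status; infer_instance

-- ===== CLAIM (what is proved, stated in full; the proofs are below) =====
def Claim_equal_calculate_case_status : Prop := ∀ (case_events : List (List (String × String))), Dom_calculate_case_status case_events → Pre_calculate_case_status case_events → Spec_calculate_case_status case_events (calculate_case_status case_events)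

-- ===== LEMMAS AND PROOFS =====
theorem pvALoop2_cases (evs : List (List (String × String))) :
    pvALoop2 evs = "" ∨ pvALoop2 evs = "In progress" := by
  induction evs with
  | nil => simp [pvALoop2]
  | cons e t ih => by_cases h : PySem.Dict.getD (PySem.Dict.mk e) "category" "" = "CASE_DOWNLOADED" <;> simp [pvALoop2, h, ih]

-- B's single pass equals A's two-scan composition, for any incoming flag value.
theorem pvBLoop_eq (evs : List (List (String × String))) (d : Bool) :
    pvBLoop evs d =
      (if pvALoop1 evs == "" then
        (if pvALoop2 evs == "" then (if d then "In progress" else "Not started")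
         else pvALoop2 evs)
       else pvALoop1 evs) := by
  induction evs generalizing d with
  | nil => simp [pvBLoop, pvALoop1, pvALoop2]
  | cons e t ih =>
    by_cases hu : PySem.Dict.getD (PySem.Dict.mk e) "category" "" = "CASE_UPLOADED"
    · simp [pvBLoop, pvALoop1, hu]
    · by_cases hd : PySem.Dict.getD (PySem.Dict.mk e) "category" "" = "CASE_DOWNLOADED"
      · rcases pvALoop2_cases t with h2 | h2 <;>
          simp [pvBLoop, pvALoop1, pvALoop2, hd, ih, h2]
      · simp [pvBLoop, pvALoop1, pvALoop2, hu, hd, ih]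

-- ===== VERDICT (by name: the statement is the Claim_ definition above) =====
theorem calculate_case_status_spec : Claim_equal_calculate_case_status := by
  intro case_events _ _
  unfold Spec_calculate_case_status calculate_case_status calculate_case_status_alt
  rw [pvBLoop_eq]
  rcases h1 : pvALoop1 case_events == "" <;> rcases h2 : pvALoop2 case_events == "" <;>
    simp_all
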